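-- pv_equiv track=rewrite | github.com/Do-code-ing/Python_Programmers | Coding_Test_Lv4/10_kakao_자동완성.py | solution
-- ===== SOURCE A (Python) =====
-- class Trie:
--     def __init__(self):
--         self.root = {}
--
--     def insert(self, string):
--         cur_data = self.root
--         for char in string:
--             if char not in cur_data:
--                 cur_data[char] = [{}, 0]
--             cur_data[char][1] += 1
--             cur_data = cur_data[char][0]
--
--     def find(self, string):
--         cur_data = self.root
--         n = len(string)
--         for i in range(n):
--             if cur_data[string[i]][1] == 1:
--                 return i + 1
--
--             cur_data = cur_data[string[i]][0]
--         return n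
--
-- def solution(words):
--     answer = 0
--     DB = Trie()
--     for word in words:
--         DB.insert(word)
--
--     for word in words:
--         answer += DB.find(word)
--
--     return answer
-- ===== SOURCE B (Python) =====
-- def solution(words):
--     # Flat prefix-count table instead of a trie: count every nonempty prefix
--     # of every word once, then for each word the typed length is the first k
--     # whose prefix is unique, else the full length.
--     cnt = {}
--     for w in words:
--         for k in range(1, len(w) + 1):
--             p = w[:k]
--             cnt[p] = cnt.get(p, 0) + 1
--     total = 0
--     for w in words:
--         cost = len(w)
--         for k in range(1, len(w) + 1):
--             if cnt[w[:k]] == 1: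
--                 cost = k
--                 break
--         total += cost
--     return total
-- ===== Notes on version B (the rewrite author's own statement) =====
-- stated objective: simpler
-- what changed: Replaces the hand-rolled Trie class (nested dicts with per-edge counters and a walking find) by a flat dictionary counting every nonempty prefix of every word, so each word's cost is just the first prefix length with count 1, else the full length.
import Mathlib
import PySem

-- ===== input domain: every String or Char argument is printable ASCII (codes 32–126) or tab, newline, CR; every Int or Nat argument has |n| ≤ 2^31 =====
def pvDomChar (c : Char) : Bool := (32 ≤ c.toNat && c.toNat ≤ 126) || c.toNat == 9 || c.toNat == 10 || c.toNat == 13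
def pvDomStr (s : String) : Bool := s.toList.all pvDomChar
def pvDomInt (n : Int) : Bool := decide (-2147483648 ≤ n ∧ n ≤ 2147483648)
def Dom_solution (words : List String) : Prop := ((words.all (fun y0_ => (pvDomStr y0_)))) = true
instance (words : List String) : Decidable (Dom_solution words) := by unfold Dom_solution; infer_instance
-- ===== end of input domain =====

-- B replaces A's hand-rolled trie class by a flat dictionary counting every nonempty
-- prefix of every word once; each word's typed length is then the first prefix length
-- whose count is 1, else the full length (objective: simpler).

-- ===== PORT A =====
-- A's Trie stores at each edge a child dict and a count; ported as a mutual inductive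
-- (nested dicts become an explicit entry list; dict lookup = first matching key).
mutual
inductive PTrie : Type where
  | node : PTrieEntries → PTrie
inductive PTrieEntries : Type where
  | nil : PTrieEntries
  | cons : Char → PTrie → Int → PTrieEntries → PTrieEntries
end

-- Trie.insert: walk the string; missing key appends [{} , 0]; increment the count.
def entriesInsert : PTrieEntries → List Char → PTrieEntries
  | es, [] => es
  | .nil, c :: cs => .cons c (.node (entriesInsert .nil cs)) 1 .nil
  | .cons c' (.node es') n rest, c :: cs =>
    if c' = c then .cons c' (.node (entriesInsert es' cs)) (n + 1) rest
    else .cons c' (.node es') n (entriesInsert rest (c :: cs))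
termination_by es cs => (cs.length, sizeOf es)

-- dict lookup cur_data[char]
def entriesGet : PTrieEntries → Char → Option (PTrie × Int)
  | .nil, _ => none
  | .cons c' t n rest, c => if c' = c then some (t, n) else entriesGet rest c

-- Trie.find: first i+1 whose count is 1, else len(string).
def trieFind : PTrieEntries → List Char → Int
  | _, [] => 0
  | es, c :: cs =>
    match entriesGet es c with
    | none => 0   -- Python would raise KeyError; unreachable in solution (every word was inserted)
    | some (.node es', n) => if n = 1 then 1 else 1 + trieFind es' cs
termination_by _ cs => cs.length

def solution (words : List String) : Int :=
  let db := words.foldl (fun es w => entriesInsert es w.toList) PTrieEntries.nil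
  words.foldl (fun acc w => acc + trieFind db w.toList) 0

-- ===== PORT B =====
-- cnt[p] = cnt.get(p, 0) + 1  for p = w[:k]  (k ≥ 1, so String.ofList (take k) is exact)
def bStep (cnt : PySem.Dict String Int) (w : List Char) (k : Int) : PySem.Dict String Int :=
  let p := String.ofList (w.take k.toNat)
  cnt.insert p (cnt.getD p 0 + 1)

def bBuild (words : List String) : PySem.Dict String Int :=
  words.foldl (fun cnt w =>
    (PySem.List.pyRange 1 ((w.toList.length : Int) + 1)).foldl (fun c k => bStep c w.toList k) cnt)
    PySem.Dict.empty

-- the `for k … if cnt[w[:k]] == 1: cost = k; break` loop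
def bCost (cnt : PySem.Dict String Int) (w : List Char) : List Int → Int
  | [] => (w.length : Int)
  | k :: ks => if cnt.getD (String.ofList (w.take k.toNat)) 0 = 1 then k else bCost cnt w ks

def solution_alt (words : List String) : Int :=
  let cnt := bBuild words
  words.foldl (fun total w =>
    total + bCost cnt w.toList (PySem.List.pyRange 1 ((w.toList.length : Int) + 1))) 0

-- ===== PRECONDITION & SPEC =====
def Spec_solution (words : List String) (out : Int) : Prop := out = solution_alt words
instance (words : List String) (out : Int) : Decidable (Spec_solution words out) := by unfold Spec_solution; infer_instance

-- ===== CLAIM (what is proved, stated in full; the proofs are below) =====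
def Claim_equal_solution : Prop := ∀ (words : List String), Dom_solution words → Spec_solution words (solution words)

-- ===== LEMMAS AND PROOFS =====

-- number of words having p as a prefix
def pcInt (ws : List String) (p : List Char) : Int :=
  (ws.countP (fun w => decide (p <+: w.toList)) : Nat)

-- index of the first 1 in a list of counts
def cOf : List Int → Option Nat
  | [] => none
  | x :: xs => if x = 1 then some 0 else (cOf xs).map (· + 1)

-- common specification of the per-word cost, from the counts of its nonempty prefixes
def specCost (f : Nat → Int) (n : Nat) : Int :=
  match cOf ((List.range n).map f) with
  | some i => (i : Int) + 1
  | none => (n : Int)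

-- count stored in the trie at the end of a nonempty path
def cntAt : PTrieEntries → List Char → Int
  | _, [] => 0
  | es, c :: cs =>
    match entriesGet es c with
    | none => 0
    | some (.node es', n) => if cs = [] then n else cntAt es' cs
termination_by _ cs => cs.length

theorem cntAt_nil (p : List Char) : cntAt .nil p = 0 := by
  cases p <;> simp [cntAt, entriesGet]

theorem cntAt_cons_self (c : Char) (t : PTrieEntries) (n : Int) (rest : PTrieEntries)
    (q : List Char) : cntAt (.cons c (.node t) n rest) (c :: q) = if q = [] then n else cntAt t q := by
  simp [cntAt, entriesGet]

theorem cntAt_cons_ne (c' : Char) (t : PTrie) (n : Int) (rest : PTrieEntries) (a : Char)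
    (q : List Char) (h : c' ≠ a) :
    cntAt (.cons c' t n rest) (a :: q) = cntAt rest (a :: q) := by
  simp [cntAt, entriesGet, h]

theorem insert_cntAt (es : PTrieEntries) (w : List Char) :
    ∀ p, p ≠ [] → cntAt (entriesInsert es w) p = cntAt es p + (if p <+: w then 1 else 0) := by
  induction es, w using entriesInsert.induct with
  | case1 es =>
    intro p hp
    have hnp : ¬ p <+: ([] : List Char) := fun h => hp (List.prefix_nil.mp h)
    simp [entriesInsert, hnp]
  | case2 c cs ih =>
    intro p hp
    obtain ⟨a, q, rfl⟩ := List.exists_cons_of_ne_nil hp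
    rw [show entriesInsert .nil (c :: cs) = .cons c (.node (entriesInsert .nil cs)) 1 .nil from by
      simp [entriesInsert]]
    by_cases hac : c = a
    · subst hac
      rw [cntAt_cons_self, cntAt_nil]
      simp only [List.cons_prefix_cons, true_and]
      rcases Decidable.em (q = []) with hq | hq
      · subst hq; simp
      · rw [if_neg hq, ih q hq, cntAt_nil]
    · rw [cntAt_cons_ne _ _ _ _ _ _ hac, cntAt_nil]
      simp [List.cons_prefix_cons, Ne.symm hac]
  | case3 es' n rest c cs ih =>
    intro p hp
    obtain ⟨a, q, rfl⟩ := List.exists_cons_of_ne_nil hp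
    rw [show entriesInsert (.cons c (.node es') n rest) (c :: cs)
          = .cons c (.node (entriesInsert es' cs)) (n + 1) rest from by simp [entriesInsert]]
    by_cases hac : c = a
    · subst hac
      rw [cntAt_cons_self, cntAt_cons_self]
      simp only [List.cons_prefix_cons, true_and]
      rcases Decidable.em (q = []) with hq | hq
      · subst hq; simp
      · rw [if_neg hq, if_neg hq, ih q hq]
    · rw [cntAt_cons_ne _ _ _ _ _ _ hac, cntAt_cons_ne _ _ _ _ _ _ hac]
      simp [List.cons_prefix_cons, Ne.symm hac]
  | case4 c' es' n rest c cs hne ih =>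
    intro p hp
    obtain ⟨a, q, rfl⟩ := List.exists_cons_of_ne_nil hp
    rw [show entriesInsert (.cons c' (.node es') n rest) (c :: cs)
          = .cons c' (.node es') n (entriesInsert rest (c :: cs)) from by simp [entriesInsert, hne]]
    by_cases hac : c' = a
    · subst hac
      rw [cntAt_cons_self, cntAt_cons_self]
      simp [List.cons_prefix_cons, hne]
    · rw [cntAt_cons_ne _ _ _ _ _ _ hac, cntAt_cons_ne _ _ _ _ _ _ hac]
      exact ih _ (by simp)

theorem build_cntAt (ws : List String) (es : PTrieEntries) (p : List Char) (hp : p ≠ []) :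
    cntAt (ws.foldl (fun es w => entriesInsert es w.toList) es) p = cntAt es p + pcInt ws p := by
  induction ws generalizing es with
  | nil => simp [pcInt]
  | cons w ws ih =>
    rw [List.foldl_cons, ih, insert_cntAt es w.toList p hp]
    unfold pcInt
    rw [List.countP_cons]
    push_cast
    by_cases hpre : p <+: w.toList
    · simp only [hpre, decide_true, if_pos]; ring
    · simp only [hpre, decide_false, if_false]; push_cast; ring

theorem find_eq (w : List Char) (es : PTrieEntries)
    (h : ∀ i, i < w.length → 1 ≤ cntAt es (w.take (i + 1))) :
    trieFind es w = specCost (fun i => cntAt es (w.take (i + 1))) w.length := by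
  induction w generalizing es with
  | nil => simp [trieFind, specCost, cOf]
  | cons c cs ih =>
    have h0 : 1 ≤ cntAt es [c] := by simpa using h 0 (by simp)
    rcases hget : entriesGet es c with _ | ⟨t, n⟩
    · exfalso; rw [show cntAt es [c] = 0 from by simp [cntAt, hget]] at h0; omega
    · obtain ⟨es'⟩ := t
      have hn : cntAt es [c] = n := by simp [cntAt, hget]
      have hf : trieFind es (c :: cs) = if n = 1 then 1 else 1 + trieFind es' cs := by
        simp [trieFind, hget]
      have hmap : (List.range cs.length).map ((fun i => cntAt es ((c :: cs).take (i + 1))) ∘ Nat.succ)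
          = (List.range cs.length).map (fun i => cntAt es' (cs.take (i + 1))) := by
        apply List.map_congr_left
        intro i hi
        rw [List.mem_range] at hi
        have hne : cs.take (i + 1) ≠ [] := by
          have : cs ≠ [] := by intro hcs; rw [hcs] at hi; simp at hi
          simp [List.take_eq_nil_iff, this]
        simp only [Function.comp]
        show cntAt es ((c :: cs).take (i + 1 + 1)) = cntAt es' (cs.take (i + 1))
        rw [List.take_succ_cons]
        simp [cntAt, hget, hne]
      have hspec : specCost (fun i => cntAt es ((c :: cs).take (i + 1))) (c :: cs).length
          = (match cOf (n :: (List.range cs.length).map (fun i => cntAt es' (cs.take (i + 1)))) with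
             | some i => (i : Int) + 1
             | none => ((cs.length + 1 : Nat) : Int)) := by
        unfold specCost
        rw [List.length_cons, List.range_succ_eq_map, List.map_cons, List.map_map, hmap]
        simp [hn]
      rw [hf, hspec]
      by_cases h1 : n = 1
      · simp [h1, cOf]
      · have ihh : trieFind es' cs = specCost (fun i => cntAt es' (cs.take (i + 1))) cs.length := by
          apply ih
          intro i hi
          have hne : cs.take (i + 1) ≠ [] := by
            have : cs ≠ [] := by intro hcs; rw [hcs] at hi; simp at hi
            simp [List.take_eq_nil_iff, this]
          have := h (i + 1) (by simpa using Nat.succ_lt_succ hi)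
          rw [List.take_succ_cons] at this
          rw [show cntAt es (c :: cs.take (i + 1)) = cntAt es' (cs.take (i + 1)) from by
            simp [cntAt, hget, hne]] at this
          exact this
        rw [ihh]
        unfold specCost
        rw [show cOf (n :: (List.range cs.length).map (fun i => cntAt es' (cs.take (i + 1))))
              = (cOf ((List.range cs.length).map (fun i => cntAt es' (cs.take (i + 1))))).map (· + 1)
            from by simp [cOf, h1]]
        cases hc : cOf ((List.range cs.length).map (fun i => cntAt es' (cs.take (i + 1)))) with
        | none => simp [h1]; ring
        | some i => simp [h1]; ring

theorem getD_innerFold (w : List Char) (cnt : PySem.Dict String Int) (p : List Char) (hp : p ≠ []) :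
    ((PySem.List.pyRange 1 ((w.length : Int) + 1)).foldl (fun c k => bStep c w k) cnt).getD
        (String.ofList p) 0
      = cnt.getD (String.ofList p) 0 + (if p <+: w then 1 else 0) := by
  induction w using List.reverseRecOn generalizing cnt with
  | nil =>
    have hnp : ¬ p <+: ([] : List Char) := fun h => hp (List.prefix_nil.mp h)
    simp [PySem.List.pyRange_one_eq_nil, hnp]
  | append_singleton u a ih =>
    have hlen : ((u ++ [a]).length : Int) + 1 = (((u.length : Int) + 1)) + 1 := by
      simp
    rw [hlen, PySem.List.pyRange_one_succ_right (by omega), List.foldl_append]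
    have hcongr : (PySem.List.pyRange 1 ((u.length : Int) + 1)).foldl
          (fun c k => bStep c (u ++ [a]) k) cnt
        = (PySem.List.pyRange 1 ((u.length : Int) + 1)).foldl (fun c k => bStep c u k) cnt := by
      apply PySem.List.foldl_congr_mem
      intro acc k hk
      rw [PySem.List.mem_pyRange_one] at hk
      have htake : (u ++ [a]).take k.toNat = u.take k.toNat := by
        apply List.take_append_of_le_length
        omega
      simp [bStep, htake]
    rw [hcongr]
    have hkey : (u ++ [a]).take ((u.length : Int) + 1).toNat = u ++ [a] := by
      apply List.take_of_length_le
      simp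
    rw [List.foldl_cons, List.foldl_nil]
    show (PySem.Dict.insert _ _ _).getD _ _ = _
    rw [hkey] at *
    rw [PySem.Dict.getD_insert]
    by_cases heq : String.ofList p = String.ofList (u ++ [a])
    · have hpe : p = u ++ [a] := String.ofList_inj.mp heq
      subst hpe
      rw [if_pos heq, ih _]
      have h1 : ¬ (u ++ [a] <+: u) := by
        intro h
        have := h.length_le
        simp at this
      simp [h1]
    · rw [if_neg heq, ih _]
      have hpe : p ≠ u ++ [a] := fun h => heq (by rw [h])
      have hiff : (p <+: u ++ [a]) ↔ (p <+: u) := by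
        rw [List.prefix_concat_iff]
        simp [hpe]
      simp only [hiff]

theorem getD_bBuildAux (ws : List String) (d : PySem.Dict String Int) (p : List Char)
    (hp : p ≠ []) :
    (ws.foldl (fun cnt w =>
        (PySem.List.pyRange 1 ((w.toList.length : Int) + 1)).foldl (fun c k => bStep c w.toList k) cnt)
      d).getD (String.ofList p) 0
      = d.getD (String.ofList p) 0 + pcInt ws p := by
  induction ws generalizing d with
  | nil => simp [pcInt]
  | cons w ws ih =>
    rw [List.foldl_cons, ih, getD_innerFold w.toList d p hp]
    unfold pcInt
    rw [List.countP_cons]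
    push_cast
    by_cases hpre : p <+: w.toList
    · simp only [hpre, decide_true, if_pos]; ring
    · simp only [hpre, decide_false, if_false]; push_cast; ring

theorem getD_bBuild (ws : List String) (p : List Char) (hp : p ≠ []) :
    (bBuild ws).getD (String.ofList p) 0 = pcInt ws p := by
  unfold bBuild
  rw [getD_bBuildAux ws _ p hp]
  simp

theorem bCost_eq (cnt : PySem.Dict String Int) (w : List Char) (m j : Nat) :
    bCost cnt w (PySem.List.pyRange ((j : Int) + 1) ((j : Int) + 1 + (m : Int)))
      = (match cOf ((List.range m).map fun i => cnt.getD (String.ofList (w.take (j + 1 + i))) 0) with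
         | some i => (j : Int) + 1 + (i : Int)
         | none => (w.length : Int)) := by
  induction m generalizing j with
  | zero => simp [bCost, cOf, PySem.List.pyRange_one_eq_nil]
  | succ m ih =>
    rw [PySem.List.pyRange_one_cons (by push_cast; omega)]
    have htn : ((j : Int) + 1).toNat = j + 1 := by omega
    rw [List.range_succ_eq_map, List.map_cons, List.map_map]
    show (if cnt.getD (String.ofList (w.take ((j : Int) + 1).toNat)) 0 = 1 then (j : Int) + 1
          else bCost cnt w (PySem.List.pyRange ((j : Int) + 1 + 1) ((j : Int) + 1 + ((m : Nat) + 1 : Nat)))) = _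
    rw [htn]
    by_cases h1 : cnt.getD (String.ofList (w.take (j + 1))) 0 = 1
    · rw [if_pos h1]
      have : j + 1 + 0 = j + 1 := by omega
      simp [cOf, this, h1]
    · rw [if_neg h1]
      have hrange : (j : Int) + 1 + ((m : Nat) + 1 : Nat) = ((j + 1 : Nat) : Int) + 1 + (m : Int) := by
        push_cast; ring
      rw [hrange, show (j : Int) + 1 + 1 = ((j + 1 : Nat) : Int) + 1 from by push_cast; ring,
        ih (j + 1)]
      have hmap : (List.range m).map ((fun i => cnt.getD (String.ofList (w.take (j + 1 + i))) 0) ∘ Nat.succ)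
          = (List.range m).map (fun i => cnt.getD (String.ofList (w.take (j + 1 + 1 + i))) 0) := by
        apply List.map_congr_left
        intro i _
        simp only [Function.comp]
        rw [show j + 1 + (i + 1) = j + 1 + 1 + i from by omega]
      have hhead : j + 1 + 0 = j + 1 := by omega
      rw [show (cOf (cnt.getD (String.ofList (w.take (j + 1 + 0))) 0
              :: (List.range m).map ((fun i => cnt.getD (String.ofList (w.take (j + 1 + i))) 0) ∘ Nat.succ)))
            = (cOf ((List.range m).map (fun i => cnt.getD (String.ofList (w.take (j + 1 + 1 + i))) 0))).map (· + 1)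
          from by rw [hmap]; simp [cOf, hhead, h1]]
      cases cOf ((List.range m).map (fun i => cnt.getD (String.ofList (w.take (j + 1 + 1 + i))) 0)) with
      | none => simp
      | some i => simp; ring

theorem foldl_add_congr {α : Type} (f g : α → Int) :
    ∀ (l : List α) (a : Int), (∀ x ∈ l, f x = g x) →
      l.foldl (fun acc x => acc + f x) a = l.foldl (fun acc x => acc + g x) a
  | [], _, _ => rfl
  | x :: xs, a, h => by
    rw [List.foldl_cons, List.foldl_cons, h x (by simp)]
    exact foldl_add_congr f g xs _ (fun y hy => h y (by simp [hy]))

theorem specCost_congr (f g : Nat → Int) (n : Nat) (h : ∀ i, i < n → f i = g i) :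
    specCost f n = specCost g n := by
  unfold specCost
  rw [List.map_congr_left (fun i hi => h i (List.mem_range.mp hi))]

theorem perWord (words : List String) (w : String) (hw : w ∈ words) :
    trieFind (words.foldl (fun es w => entriesInsert es w.toList) PTrieEntries.nil) w.toList
      = bCost (bBuild words) w.toList (PySem.List.pyRange 1 ((w.toList.length : Int) + 1)) := by
  have hne : ∀ i, i < w.toList.length → w.toList.take (i + 1) ≠ [] := by
    intro i hi
    simp only [ne_eq, List.take_eq_nil_iff]
    push Not
    constructor
    · omega
    · intro hcs; rw [hcs] at hi; simp at hi
  have hcnt : ∀ i, i < w.toList.length →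
      cntAt (words.foldl (fun es w => entriesInsert es w.toList) PTrieEntries.nil)
          (w.toList.take (i + 1))
        = pcInt words (w.toList.take (i + 1)) := by
    intro i hi
    rw [build_cntAt words .nil _ (hne i hi), cntAt_nil]
    ring
  have hpos : ∀ i, i < w.toList.length →
      1 ≤ cntAt (words.foldl (fun es w => entriesInsert es w.toList) PTrieEntries.nil)
          (w.toList.take (i + 1)) := by
    intro i hi
    rw [hcnt i hi]
    unfold pcInt
    have : 0 < words.countP (fun v => decide (w.toList.take (i + 1) <+: v.toList)) :=
      List.countP_pos_iff.mpr ⟨w, hw, by simp [List.take_prefix]⟩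
    exact_mod_cast this
  rw [find_eq _ _ hpos, specCost_congr _ _ _ hcnt]
  -- B side
  have hb := bCost_eq (bBuild words) w.toList w.toList.length 0
  rw [show ((0 : Nat) : Int) + 1 = 1 from by norm_num,
      show (1 : Int) + (w.toList.length : Int) = (w.toList.length : Int) + 1 from by ring] at hb
  rw [hb]
  have hmap : (List.range w.toList.length).map
        (fun i => (bBuild words).getD (String.ofList (w.toList.take (0 + 1 + i))) 0)
      = (List.range w.toList.length).map (fun i => pcInt words (w.toList.take (i + 1))) := by
    apply List.map_congr_left
    intro i hi
    rw [List.mem_range] at hi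
    rw [show 0 + 1 + i = i + 1 from by omega, getD_bBuild words _ (hne i hi)]
  rw [hmap]
  unfold specCost
  cases cOf ((List.range w.toList.length).map (fun i => pcInt words (w.toList.take (i + 1)))) with
  | none => simp
  | some i => simp; ring

-- ===== VERDICT (by name: the statement is the Claim_ definition above) =====
theorem solution_spec : Claim_equal_solution := by
  intro words _
  show solution words = solution_alt words
  simp only [solution, solution_alt]
  exact foldl_add_congr (fun w => trieFind _ w.toList)
    (fun w => bCost _ w.toList (PySem.List.pyRange 1 ((w.toList.length : Int) + 1)))
    words 0 (fun w hw => perWord words w hw)
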